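-- pv_equiv track=rewrite | github.com/skitela/potential-robot | TOOLS/stage1_counterfactual_summary.py | symbol_base
-- ===== SOURCE A (Python) =====
-- def symbol_base(sym: str) -> str:
--     s = str(sym or "").strip().upper()
--     if not s:
--         return ""
--     for sep in (".", "-", "_"):
--         if sep in s:
--             s = s.split(sep, 1)[0]
--     return s
-- ===== SOURCE B (Python) =====
-- def symbol_base(sym: str) -> str:
--     # Single left-to-right character scan instead of repeated split/truncate passes.
--     s = str(sym or "").strip().upper()
--     out = []
--     for ch in s:
--         if ch in ".-_":
--             break
--         out.append(ch)
--     return "".join(out)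
-- ===== Notes on version B (the rewrite author's own statement) =====
-- stated objective: simpler
-- what changed: Replaced the three sequential split-and-truncate passes over the string with a single left-to-right character scan that stops at the first separator.
import Mathlib
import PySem

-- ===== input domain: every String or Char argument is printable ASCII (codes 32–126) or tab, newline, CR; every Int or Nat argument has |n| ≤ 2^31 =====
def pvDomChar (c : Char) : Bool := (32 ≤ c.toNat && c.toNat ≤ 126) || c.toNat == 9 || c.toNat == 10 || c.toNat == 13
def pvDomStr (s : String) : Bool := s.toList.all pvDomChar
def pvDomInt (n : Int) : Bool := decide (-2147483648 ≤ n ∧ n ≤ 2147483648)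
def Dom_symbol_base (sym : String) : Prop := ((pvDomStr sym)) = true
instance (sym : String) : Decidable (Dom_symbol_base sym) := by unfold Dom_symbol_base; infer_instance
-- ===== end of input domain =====

-- B replaces A's three sequential split-and-truncate passes by a single
-- left-to-right character scan that stops at the first separator (simpler, one pass).


-- ===== PORT A =====
-- one iteration of A's loop body: 'if sep in s: s = s.split(sep, 1)[0]'
-- (sep is a one-character non-empty string, so split returns `some` of a nonempty
-- list and index 0 is always in range: the getD/headD defaults are never used)
def pvTrunc (s : List Char) (sep : Char) : List Char :=
  if PySem.Chars.isIn [sep] s then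
    ((PySem.Chars.splitMax? s [sep] 1).getD []).headD []
  else s

def symbol_base (sym : String) : String :=
  -- str(sym or "") is sym itself for a str argument (the only falsy str is "")
  let s := PySem.Chars.upper (PySem.Chars.strip sym.toList)
  if s = [] then ""
  else String.ofList (['.', '-', '_'].foldl pvTrunc s)

-- ===== PORT B =====
-- 'for ch in s: if ch in ".-_": break; out.append(ch)'
def pvScan : List Char → List Char
  | [] => []
  | c :: rest => if c = '.' || c = '-' || c = '_' then [] else c :: pvScan rest

def symbol_base_alt (sym : String) : String :=
  String.ofList (pvScan (PySem.Chars.upper (PySem.Chars.strip sym.toList)))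

-- ===== PRECONDITION & SPEC =====
def Spec_symbol_base (sym : String) (out : String) : Prop := out = symbol_base_alt sym
instance (sym : String) (out : String) : Decidable (Spec_symbol_base sym out) := by unfold Spec_symbol_base; infer_instance

-- ===== CLAIM (what is proved, stated in full; the proofs are below) =====
def Claim_equal_symbol_base : Prop := ∀ (sym : String), Dom_symbol_base sym → Spec_symbol_base sym (symbol_base sym)

-- ===== LEMMAS AND PROOFS =====

-- splitOnMax.go with maxsplit exhausted returns the remainder as one final piece
lemma pv_go_zero (c : Char) (fuel : Nat) (l cur : List Char) (acc : List (List Char)) :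
    PySem.Chars.splitOnMax.go [c] fuel 0 l cur acc
      = acc.reverse ++ [cur.reverse ++ l] := by
  cases fuel with
  | zero => simp [PySem.Chars.splitOnMax.go]
  | succ f => cases l with
    | nil => simp [PySem.Chars.splitOnMax.go]
    | cons x xs => simp [PySem.Chars.splitOnMax.go]

-- the first piece of a (sep, maxsplit = 1) split is the prefix before the first sep
lemma pv_go_one (c : Char) (fuel : Nat) :
    ∀ (l cur : List Char) (acc : List (List Char)), l.length < fuel →
      ∃ tail, PySem.Chars.splitOnMax.go [c] fuel 1 l cur acc
        = acc.reverse ++ (cur.reverse ++ l.takeWhile (· != c)) :: tail := by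
  induction fuel with
  | zero => intro l cur acc h; exact absurd h (by omega)
  | succ f ih =>
    intro l cur acc h
    cases l with
    | nil =>
      exact ⟨[], by simp [PySem.Chars.splitOnMax.go]⟩
    | cons x xs =>
      by_cases hx : x = c
      · subst hx
        refine ⟨[xs], ?_⟩
        simp [PySem.Chars.splitOnMax.go, pv_go_zero]
      · have hlen : xs.length < f := by simpa using Nat.lt_of_succ_lt_succ h
        obtain ⟨tail, htail⟩ := ih xs (x :: cur) acc hlen
        refine ⟨tail, ?_⟩
        have hpre : [c].isPrefixOf (x :: xs) = false := by
          simp [List.isPrefixOf, Ne.symm hx]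
        simp [PySem.Chars.splitOnMax.go, hpre, hx, htail]

lemma pv_trunc_eq (s : List Char) (c : Char) :
    pvTrunc s c = s.takeWhile (· != c) := by
  unfold pvTrunc
  by_cases hin : PySem.Chars.isIn [c] s
  · obtain ⟨tail, htail⟩ :=
      pv_go_one c (s.length + 1) s [] [] (Nat.lt_succ_self _)
    simp [hin, PySem.Chars.splitMax?, PySem.Chars.splitOnMax, htail]
  · have hmem : c ∉ s := by
      intro hc
      have : PySem.Chars.isIn [c] s = true := by
        rw [PySem.Chars.isIn_iff_infix]
        obtain ⟨l₁, l₂, rfl⟩ := List.append_of_mem hc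
        exact ⟨l₁, l₂, by simp⟩
      simp [this] at hin
    have : s.takeWhile (· != c) = s :=
      List.takeWhile_eq_self_iff.mpr (fun a ha => by
        rcases eq_or_ne a c with rfl | hne
        · exact absurd ha hmem
        · simp [hne])
    simp [hin, this]

lemma pv_scan_eq_takeWhile (s : List Char) :
    pvScan s
      = s.takeWhile (fun a =>
          decide ((a != '_') = true ∧ ((a != '-') = true ∧ (a != '.') = true))) := by
  induction s with
  | nil => rfl
  | cons x xs ih =>
    by_cases hx : (x = '.' ∨ x = '-' ∨ x = '_')
    · rcases hx with h | h | h <;> subst h <;> simp [pvScan]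
    · rw [not_or, not_or] at hx
      obtain ⟨h1, h2, h3⟩ := hx
      simp [pvScan, h1, h2, h3, ih]

lemma pv_folds_eq (s : List Char) :
    pvTrunc (pvTrunc (pvTrunc s '.') '-') '_' = pvScan s := by
  simp only [pv_trunc_eq, List.takeWhile_takeWhile]
  rw [pv_scan_eq_takeWhile]
  congr 1
  funext a
  simp

-- ===== VERDICT (by name: the statement is the Claim_ definition above) =====
theorem symbol_base_spec : Claim_equal_symbol_base := by
  intro sym _
  unfold Spec_symbol_base symbol_base symbol_base_alt
  by_cases h : PySem.Chars.upper (PySem.Chars.strip sym.toList) = []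
  · rw [if_pos h, h]
    rfl
  · simp [h, pv_folds_eq]
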